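-- pv_equiv track=rewrite | github.com/joaogsma/Image-Processing | lbp.py | u_value
-- ===== SOURCE A (Python) =====
-- def get_bit(value, i):
--     return ((1 << i) & value) >> i
--
-- def u_value(lbp_sequence, P):
--     # Accumulator for the U value
--     u_val = 0
--
--     # Compute the number of transitions from the first bit
--     # to the last
--     p = 1
--     while p < P:
--         current = get_bit(lbp_sequence, p)
--         previous = get_bit(lbp_sequence, p-1)
--
--         u_val += abs(current - previous)
--         p += 1
--
--     # Check for a possible transition between the last bit
--     # and the first
--     last = get_bit(lbp_sequence, P-1)
--     first = get_bit(lbp_sequence, 0)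
--     u_val += abs(last - first)
--
--     return u_val
-- ===== SOURCE B (Python) =====
-- def u_value(lbp_sequence, P):
--     x = lbp_sequence & ((1 << P) - 1)
--     rot = (x >> 1) | ((x & 1) << (P - 1))
--     y = x ^ rot
--     count = 0
--     while y:
--         y &= y - 1
--         count += 1
--     return count
-- ===== Notes on version B (the rewrite author's own statement) =====
-- stated objective: faster
-- what changed: Replaces A's explicit per-bit loop of P adjacent-bit comparisons (each rebuilding a P-bit mask 1<<p) by the standard bit trick: mask lbp to P bits, XOR it with its one-step circular rotation, and popcount the result with the Kernighan y&=y-1 loop.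
import Mathlib
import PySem

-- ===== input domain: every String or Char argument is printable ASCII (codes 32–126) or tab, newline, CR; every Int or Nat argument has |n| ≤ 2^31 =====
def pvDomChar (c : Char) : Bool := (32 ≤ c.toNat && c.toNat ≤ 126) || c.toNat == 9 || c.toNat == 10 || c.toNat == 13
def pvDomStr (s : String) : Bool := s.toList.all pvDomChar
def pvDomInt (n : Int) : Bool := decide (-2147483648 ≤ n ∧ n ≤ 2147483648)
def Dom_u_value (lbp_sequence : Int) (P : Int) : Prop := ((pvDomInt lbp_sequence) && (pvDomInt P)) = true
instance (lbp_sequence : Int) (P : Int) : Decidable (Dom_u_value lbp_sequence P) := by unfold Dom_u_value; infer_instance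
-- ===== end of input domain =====

-- B replaces A's per-bit loop by mask / one-step circular rotation / XOR / popcount (idiomatic bit trick).

-- ===== PORT A =====
-- def get_bit(value, i): return ((1 << i) & value) >> i   (i ≥ 0 on every call admitted by Pre_)
def get_bit (value : Int) (i : Int) : Int :=
  (PySem.Int.band (1 <<< i.toNat) value) >>> i.toNat

-- the 'while p < P' loop of A, accumulating u_val
def u_value_loop (v : Int) (P : Int) (p : Int) (u : Int) : Int :=
  if p < P then
    u_value_loop v P (p + 1) (u + |get_bit v p - get_bit v (p - 1)|)
  else u
termination_by (P - p).toNat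
decreasing_by omega

def u_value (lbp_sequence : Int) (P : Int) : Int :=
  let u_val := u_value_loop lbp_sequence P 1 0
  let last := get_bit lbp_sequence (P - 1)
  let first := get_bit lbp_sequence 0
  u_val + |last - first|

-- ===== PORT B =====
-- x = lbp & ((1<<P)-1); rot = (x>>1) | ((x&1)<<(P-1)); y = x ^ rot; Kernighan popcount of y
-- the 'while y: y &= y - 1; count += 1' loop of B; y = x ^ rot is nonnegative here
-- (x and rot are both nonnegative), so the loop state is carried as a Nat (exact)
def u_value_alt_loop (y : Nat) (count : Int) : Int :=
  if y = 0 then count else u_value_alt_loop (y &&& (y - 1)) (count + 1)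
termination_by y
decreasing_by
  have h : y &&& (y - 1) ≤ y - 1 := Nat.and_le_right
  omega

def u_value_alt (lbp_sequence : Int) (P : Int) : Int :=
  let x := PySem.Int.band lbp_sequence ((1 <<< P.toNat) - 1)
  let rot := PySem.Int.bor (x >>> (1 : Nat)) ((PySem.Int.band x 1) <<< (P - 1).toNat)
  u_value_alt_loop (PySem.Int.bxor x rot).toNat 0

-- ===== PRECONDITION & SPEC =====
-- Python A raises ValueError ('negative shift count', from 1 << (P-1)) whenever P < 1; B raises there too.
def Pre_u_value (lbp_sequence : Int) (P : Int) : Prop := 1 ≤ P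
instance (lbp_sequence : Int) (P : Int) : Decidable (Pre_u_value lbp_sequence P) := by
  unfold Pre_u_value; infer_instance
def pvWitness_u_value : Int × Int := (6, 4)

def Spec_u_value (lbp_sequence : Int) (P : Int) (out : Int) : Prop := out = u_value_alt lbp_sequence P
instance (lbp_sequence : Int) (P : Int) (out : Int) : Decidable (Spec_u_value lbp_sequence P out) := by
  unfold Spec_u_value; infer_instance

-- ===== CLAIM (what is proved, stated in full; the proofs are below) =====
def Claim_equal_u_value : Prop := ∀ (lbp_sequence : Int) (P : Int), Dom_u_value lbp_sequence P → Pre_u_value lbp_sequence P → Spec_u_value lbp_sequence P (u_value lbp_sequence P)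

-- ===== LEMMAS AND PROOFS =====

-- Python's bit i of an arbitrary int (infinite two's complement)
def pvBit (v : Int) (i : Nat) : Bool :=
  if 0 ≤ v then v.toNat.testBit i else !((-v - 1).toNat.testBit i)

theorem pv_and_two_pow (t i : Nat) : 2 ^ i &&& t = (t.testBit i).toNat * 2 ^ i := by
  apply Nat.eq_of_testBit_eq
  intro j
  rw [Nat.testBit_and, Nat.testBit_two_pow]
  by_cases h : i = j
  · subst h; cases ht : t.testBit i <;> simp [ht]
  · cases ht : t.testBit i <;> simp [Nat.testBit_mul_two_pow, h]

theorem pv_get_bit (v : Int) (i : Nat) :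
    get_bit v (i : Int) = if pvBit v i then 1 else 0 := by
  unfold get_bit pvBit
  rw [Int.toNat_natCast, Nat.one_shiftLeft]
  by_cases h : 0 ≤ v
  · rw [PySem.Int.band_of_nonneg (by positivity) h, Int.toNat_natCast, pv_and_two_pow,
      ← Int.natCast_shiftRight, Nat.shiftRight_eq_div_pow, Nat.mul_div_cancel _ (by positivity)]
    cases (v.toNat).testBit i <;> simp [h]
  · rw [PySem.Int.band.eq_1, if_pos (by positivity), if_neg h, Int.toNat_natCast,
      pv_and_two_pow, ← Int.natCast_shiftRight, Nat.shiftRight_eq_div_pow]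
    have h2 : 2 ^ i - ((-v - 1).toNat.testBit i).toNat * 2 ^ i
        = (!(-v - 1).toNat.testBit i).toNat * 2 ^ i := by
      cases (-v - 1).toNat.testBit i <;> simp
    rw [h2, Nat.mul_div_cancel _ (by positivity)]
    cases (-v - 1).toNat.testBit i <;> simp [h]

-- subtracting a bitwise subset is the same as xor-ing it away
theorem pv_sub_of_and_eq (m : Nat) : ∀ u : Nat, u &&& m = u → m - u = m ^^^ u := by
  induction m using Nat.strong_induction_on with
  | _ m ih =>
    intro u h
    by_cases hm : m = 0
    · subst hm; simp only [Nat.and_zero] at h; subst h; simp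
    · have hdiv : u / 2 &&& m / 2 = u / 2 := by rw [← Nat.and_div_two, h]
      have ih2 := ih (m / 2) (Nat.div_lt_self (Nat.pos_of_ne_zero hm) one_lt_two) (u / 2) hdiv
      have hle2 : u / 2 ≤ m / 2 := by
        conv_lhs => rw [← hdiv]
        exact Nat.and_le_right
      have h0 : (u.testBit 0 && m.testBit 0) = u.testBit 0 := by
        rw [← Nat.testBit_and]; exact congrArg (fun x => x.testBit 0) h
      have hpar : u % 2 = 0 ∨ m % 2 = 1 := by
        rcases Nat.mod_two_eq_zero_or_one u with hu2 | hu2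
        · exact Or.inl hu2
        · rcases Nat.mod_two_eq_zero_or_one m with hm2 | hm2
          · simp only [Nat.testBit_zero, hu2, hm2] at h0; simp at h0
          · exact Or.inr hm2
      have hxd : (m ^^^ u) / 2 = m / 2 ^^^ u / 2 := Nat.xor_div_two
      have hxm : (m ^^^ u).testBit 0 = (m.testBit 0 ^^ u.testBit 0) := Nat.testBit_xor ..
      have e1 : ∀ x : Nat, x.testBit 0 = decide (x % 2 = 1) := fun x => Nat.testBit_zero ..
      rw [e1, e1, e1] at hxm
      obtain ⟨k, hk⟩ : ∃ k, m / 2 ^^^ u / 2 = k := ⟨_, rfl⟩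
      rw [hk] at ih2 hxd
      have h1 := Nat.div_add_mod (m ^^^ u) 2
      have h2 := Nat.div_add_mod m 2
      have h3 := Nat.div_add_mod u 2
      rcases Nat.mod_two_eq_zero_or_one m with hm2 | hm2 <;>
        rcases Nat.mod_two_eq_zero_or_one u with hu2 | hu2 <;>
          rcases Nat.mod_two_eq_zero_or_one (m ^^^ u) with hx | hx <;>
            simp only [hm2, hu2, hx] at hxm <;> simp at hxm <;> omega

theorem pv_band_mask_nonneg (v : Int) (q : Nat) :
    0 ≤ PySem.Int.band v ((2 ^ q : Nat) - 1 : Int) := by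
  rw [PySem.Int.band_comm]
  refine PySem.Int.band_nonneg_of_nonneg_left v ?_
  have : (1:Int) ≤ ((2 ^ q : Nat) : Int) := by exact_mod_cast Nat.one_le_two_pow
  omega

theorem pv_band_mask_testBit (v : Int) (q i : Nat) :
    (PySem.Int.band v ((2 ^ q : Nat) - 1 : Int)).toNat.testBit i
      = (decide (i < q) && pvBit v i) := by
  have hone : (1:Int) ≤ ((2 ^ q : Nat) : Int) := by exact_mod_cast Nat.one_le_two_pow
  have hmask : (0:Int) ≤ (2 ^ q : Nat) - 1 := by omega
  have htn : (((2 ^ q : Nat) - 1 : Int)).toNat = 2 ^ q - 1 := by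
    omega
  unfold pvBit
  by_cases h : 0 ≤ v
  · rw [PySem.Int.band_of_nonneg h hmask, Int.toNat_natCast, htn, Nat.testBit_and,
      Nat.testBit_two_pow_sub_one, if_pos h]
    exact Bool.and_comm _ _
  · rw [PySem.Int.band.eq_1, if_neg h, if_pos hmask, Int.toNat_natCast, htn, if_neg h]
    have hsub : (2 ^ q - 1) &&& (-v - 1).toNat &&& (2 ^ q - 1) = (2 ^ q - 1) &&& (-v - 1).toNat := by
      rw [Nat.and_comm (2 ^ q - 1) ((-v - 1).toNat), Nat.and_assoc, Nat.and_self]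
    rw [pv_sub_of_and_eq _ _ hsub, Nat.testBit_xor, Nat.testBit_and,
      Nat.testBit_two_pow_sub_one]
    cases ht : (-v - 1).toNat.testBit i <;> cases hq : decide (i < q) <;> simp_all

theorem pv_band_mask_lt (v : Int) (q : Nat) :
    (PySem.Int.band v ((2 ^ q : Nat) - 1 : Int)).toNat < 2 ^ q := by
  apply Nat.lt_pow_two_of_testBit
  intro i hi
  rw [pv_band_mask_testBit]
  have : ¬ i < q := by omega
  simp [this]

theorem pv_bitCount_sum (k : Nat) : ∀ m : Nat, m < 2 ^ k →
    PySem.Int.bitCount (m : Int) = ∑ i ∈ Finset.range k, (m.testBit i).toNat := by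
  induction k with
  | zero =>
    intro m hm
    interval_cases m
    simp
  | succ k ih =>
    intro m hm
    by_cases h0 : m = 0
    · subst h0; simp [Nat.zero_testBit]
    · rw [PySem.Int.bitCount_natCast (Nat.pos_of_ne_zero h0),
        ih (m / 2) (by omega), Finset.sum_range_succ']
      have e0 : (m.testBit 0).toNat = m % 2 := by rw [Nat.toNat_testBit]; simp
      have e1 : ∀ i, ((m / 2).testBit i).toNat = (m.testBit (i + 1)).toNat := by
        intro i; rw [Nat.testBit_add_one]
      simp only [e1, e0]
      omega

theorem pv_abs_bits (a b : Bool) :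
    |(if a then (1 : Int) else 0) - (if b then (1 : Int) else 0)| = ((a ^^ b).toNat : Int) := by
  cases a <;> cases b <;> decide

theorem pv_loop_sum (v : Int) (q : Nat) :
    ∀ (fuel pn : Nat) (u : Int), 1 ≤ pn → q - pn ≤ fuel →
      u_value_loop v (q : Int) (pn : Int) u
        = u + ((∑ i ∈ Finset.Ico pn q, (pvBit v i ^^ pvBit v (i - 1)).toNat : Nat) : Int) := by
  intro fuel
  induction fuel with
  | zero =>
    intro pn u h1 h2
    rw [u_value_loop, if_neg (by exact_mod_cast (by omega : ¬(pn < q)))]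
    rw [Finset.Ico_eq_empty (by omega)]
    simp
  | succ f ihf =>
    intro pn u h1 h2
    by_cases hlt : pn < q
    · rw [u_value_loop, if_pos (by exact_mod_cast hlt)]
      have hc1 : (pn : Int) + 1 = ((pn + 1 : Nat) : Int) := by push_cast; ring
      have hc2 : (pn : Int) - 1 = ((pn - 1 : Nat) : Int) := by omega
      rw [hc1, hc2, ihf (pn + 1) _ (by omega) (by omega),
        pv_get_bit, pv_get_bit, pv_abs_bits,
        Finset.sum_eq_sum_Ico_succ_bot hlt]
      push_cast
      ring
    · rw [u_value_loop, if_neg (by exact_mod_cast hlt)]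
      rw [Finset.Ico_eq_empty (by omega)]
      simp

theorem pv_a_closed (v : Int) (q : Nat) (hq : 1 ≤ q) :
    u_value v (q : Int)
      = ((∑ i ∈ Finset.range (q - 1), (pvBit v (i + 1) ^^ pvBit v i).toNat
          + (pvBit v (q - 1) ^^ pvBit v 0).toNat : Nat) : Int) := by
  show u_value_loop v (q : Int) 1 0 + |get_bit v ((q : Int) - 1) - get_bit v 0| = _
  have hc0 : ((0 : Nat) : Int) = (0 : Int) := rfl
  have hc1 : ((1 : Nat) : Int) = (1 : Int) := rfl
  have hc2 : ((q : Int) - 1) = ((q - 1 : Nat) : Int) := by omega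
  rw [hc2, ← hc1, ← hc0,
    pv_loop_sum v q q 1 (((0:Nat)):Int) (le_refl 1) (by omega),
    pv_get_bit, pv_get_bit, pv_abs_bits, Finset.sum_Ico_eq_sum_range]
  have hterm : ∀ k, (pvBit v (1 + k) ^^ pvBit v (1 + k - 1)).toNat
      = (pvBit v (k + 1) ^^ pvBit v k).toNat := by
    intro k
    rw [Nat.add_comm 1 k, Nat.add_sub_cancel]
  simp only [hterm]
  push_cast
  ring

-- clearing the lowest set bit drops bitCount by one
theorem pv_bitCount_and_pred (y : Nat) : 0 < y →
    PySem.Int.bitCount ((y &&& (y - 1) : Nat) : Int) + 1 = PySem.Int.bitCount (y : Nat) := by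
  induction y using Nat.strong_induction_on with
  | _ y ih =>
    intro hy
    rcases Nat.mod_two_eq_zero_or_one y with hp | hp
    · -- y even, y = 2m with m = y/2 > 0 : y &&& (y-1) = 2*(m &&& (m-1))
      have hm : 0 < y / 2 := by omega
      have hand : y &&& (y - 1) = 2 * ((y / 2) &&& (y / 2 - 1)) := by
        apply Nat.eq_of_testBit_eq
        intro i
        rcases i with _ | i
        · simp only [Nat.testBit_and, Nat.testBit_zero]
          have : ¬ y % 2 = 1 := by omega
          simp [this]
        · rw [Nat.testBit_and, Nat.testBit_add_one, Nat.testBit_add_one,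
            show 2 * (y / 2 &&& (y / 2 - 1)) = (y / 2 &&& (y / 2 - 1)) * 2 ^ 1 by ring,
            Nat.testBit_mul_two_pow]
          have e1 : (y - 1) / 2 = y / 2 - 1 := by omega
          rw [e1, ← Nat.testBit_and]
          simp [Nat.add_comm 1 i]
      have ihm := ih (y / 2) (by omega) hm
      rw [hand]
      have bc2 : ∀ k : Nat, PySem.Int.bitCount ((2 * k : Nat) : Int) = PySem.Int.bitCount (k : Nat) := by
        intro k
        rcases Nat.eq_zero_or_pos k with rfl | hk
        · simp
        · rw [PySem.Int.bitCount_natCast (by omega)]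
          have : (2 * k) % 2 = 0 := by omega
          rw [this]
          have : (2 * k) / 2 = k := by omega
          rw [this]
          omega
      rw [bc2]
      have : y = 2 * (y / 2) := by omega
      conv_rhs => rw [this, bc2]
      omega
    · -- y odd : y &&& (y - 1) = y - 1 = 2*(y/2)
      have hand : y &&& (y - 1) = y - 1 := by
        apply Nat.eq_of_testBit_eq
        intro i
        rcases i with _ | i
        · simp only [Nat.testBit_and, Nat.testBit_zero]
          have : ¬ (y - 1) % 2 = 1 := by omega
          simp [this]
        · rw [Nat.testBit_and, Nat.testBit_add_one, Nat.testBit_add_one]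
          have e1 : (y - 1) / 2 = y / 2 := by omega
          rw [e1, Bool.and_self]
      rw [hand]
      have hy1 : y - 1 = 2 * (y / 2) := by omega
      have bc2 : ∀ k : Nat, PySem.Int.bitCount ((2 * k : Nat) : Int) = PySem.Int.bitCount (k : Nat) := by
        intro k
        rcases Nat.eq_zero_or_pos k with rfl | hk
        · simp
        · rw [PySem.Int.bitCount_natCast (by omega)]
          have e : (2 * k) % 2 = 0 := by omega
          rw [e]
          have e2 : (2 * k) / 2 = k := by omega
          rw [e2]
          omega
      rw [hy1, bc2, PySem.Int.bitCount_natCast hy, hp]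
      omega

theorem pv_popLoop_eq (y : Nat) : ∀ c : Int, u_value_alt_loop y c = c + (PySem.Int.bitCount (y : Nat) : Int) := by
  induction y using Nat.strong_induction_on with
  | _ y ih =>
    intro c
    rw [u_value_alt_loop]
    by_cases hy : y = 0
    · simp [hy]
    · rw [if_neg hy]
      have hlt : y &&& (y - 1) < y := by
        have h : y &&& (y - 1) ≤ y - 1 := Nat.and_le_right
        omega
      rw [ih _ hlt]
      have := pv_bitCount_and_pred y (by omega)
      omega

theorem pv_b_closed (v : Int) (q : Nat) (hq : 1 ≤ q) :
    u_value_alt v (q : Int)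
      = ((∑ i ∈ Finset.range (q - 1), (pvBit v (i + 1) ^^ pvBit v i).toNat
          + (pvBit v (q - 1) ^^ pvBit v 0).toNat : Nat) : Int) := by
  show u_value_alt_loop (PySem.Int.bxor _ _).toNat 0 = _
  rw [Int.toNat_natCast, Nat.one_shiftLeft]
  set n : Nat := (PySem.Int.band v ((2 ^ q : Nat) - 1 : Int)).toNat with hn
  have hx : PySem.Int.band v ((2 ^ q : Nat) - 1 : Int) = (n : Int) :=
    (Int.toNat_of_nonneg (pv_band_mask_nonneg v q)).symm
  have hnlt : n < 2 ^ q := pv_band_mask_lt v q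
  have hnbit : ∀ i, n.testBit i = (decide (i < q) && pvBit v i) := fun i =>
    pv_band_mask_testBit v q i
  have hq2 : ((q : Int) - 1).toNat = q - 1 := by omega
  rw [hx, ← Int.natCast_shiftRight, hq2]
  rw [show PySem.Int.band (n : Int) 1 = ((n &&& 1 : Nat) : Int) from PySem.Int.band_natCast n 1]
  rw [show ((n &&& 1 : Nat) : Int) <<< (q - 1) = (((n &&& 1) <<< (q - 1) : Nat) : Int) from
    (Int.natCast_shiftLeft ..)]
  rw [PySem.Int.bor_natCast, PySem.Int.bxor_natCast]
  set r : Nat := n >>> 1 ||| (n &&& 1) <<< (q - 1) with hr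
  have hrbit : ∀ i, r.testBit i
      = (n.testBit (1 + i) || (decide (q - 1 ≤ i) && (n &&& 1).testBit (i - (q - 1)))) := by
    intro i
    rw [hr, Nat.testBit_or, Nat.testBit_shiftRight, Nat.testBit_shiftLeft]
  have hand1 : ∀ j, (n &&& 1).testBit j = (n.testBit j && decide (j = 0)) := by
    intro j
    rw [Nat.testBit_and]
    rcases j with _ | j
    · simp
    · simp [Nat.testBit_add_one]
  have hrlt : r < 2 ^ q := by
    apply Nat.lt_pow_two_of_testBit
    intro i hi
    rw [hrbit, hand1]
    have e1 : n.testBit (1 + i) = false := by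
      rw [hnbit]; simp; omega
    have e2 : decide (i - (q - 1) = 0) = false := by
      simp; omega
    rw [e1, e2]
    simp
  have hxlt : n ^^^ r < 2 ^ q := Nat.xor_lt_two_pow hnlt hrlt
  rw [Int.toNat_natCast, pv_popLoop_eq, pv_bitCount_sum q _ hxlt, zero_add]
  -- split off the top index q - 1
  have hsplit : q = (q - 1) + 1 := by omega
  rw [hsplit, Finset.sum_range_succ, ← hsplit]
  congr 1
  congr 1
  · apply Finset.sum_congr rfl
    intro i hi
    have hiq : i < q - 1 := Finset.mem_range.mp hi
    rw [Nat.testBit_xor, hrbit, hand1]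
    have e1 : n.testBit i = pvBit v i := by rw [hnbit]; simp; omega
    have e2 : n.testBit (1 + i) = pvBit v (i + 1) := by
      rw [hnbit]
      have : 1 + i = i + 1 := by omega
      rw [this]; simp; omega
    have e3 : decide (q - 1 ≤ i) = false := by simp; omega
    rw [e1, e2, e3]
    cases pvBit v i <;> cases pvBit v (i + 1) <;> simp [Bool.xor_comm]
  · rw [Nat.testBit_xor, hrbit, hand1]
    have e1 : n.testBit (q - 1) = pvBit v (q - 1) := by rw [hnbit]; simp; omega
    have e2 : n.testBit (1 + (q - 1)) = false := by rw [hnbit]; simp; omega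
    have e3 : decide (q - 1 ≤ q - 1) = true := by simp
    have e4 : n.testBit (q - 1 - (q - 1)) = pvBit v 0 := by
      rw [Nat.sub_self, hnbit]; simp; omega
    have e5 : decide (q - 1 - (q - 1) = 0) = true := by simp
    rw [e1, e2, e3, e4, e5]
    cases pvBit v (q - 1) <;> cases pvBit v 0 <;> simp [Bool.xor_comm]

-- ===== VERDICT (by name: the statement is the Claim_ definition above) =====
theorem u_value_spec : Claim_equal_u_value := by
  intro v P _ hpre
  unfold Spec_u_value
  have hq : 1 ≤ P.toNat := by unfold Pre_u_value at hpre; omega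
  have hP : P = (P.toNat : Int) := by omega
  rw [hP, pv_a_closed v P.toNat hq, pv_b_closed v P.toNat hq]
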